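-- pv_equiv track=rewrite | github.com/cal-spacely/testing-testing | charleston_safety_trends_GNEWS.py | remove_author_bio
-- ===== SOURCE A (Python) =====
-- def remove_author_bio(text):
--     lines = text.splitlines()
--     cleaned = []
--     skip = True
--
--     for line in lines:
--         stripped = line.strip()
--
--         # Detect start of real article body
--         if (
--             stripped.startswith(("CHARLESTON", "NORTH CHARLESTON", "COLUMBIA", "GREENVILLE", "SPARTANBURG"))
--             or stripped.startswith("—")  # em dash lead
--             or stripped[:1].isupper() and " — " in stripped  # e.g., "CHARLESTON —"
--             or stripped.startswith("It was")  # many P&C articles start this way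
--             or stripped.startswith("On ")  # date-led ledes
--         ):
--             skip = False
--
--         if not skip:
--             cleaned.append(line)
--
--     return "\n".join(cleaned).strip()
-- ===== SOURCE B (Python) =====
-- def _is_body_start(stripped):
--     return (
--         stripped.startswith(("CHARLESTON", "NORTH CHARLESTON", "COLUMBIA", "GREENVILLE", "SPARTANBURG"))
--         or stripped.startswith("—")
--         or stripped[:1].isupper() and " — " in stripped
--         or stripped.startswith("It was")
--         or stripped.startswith("On ")
--     )
--
--
-- def remove_author_bio(text):
--     # Backward pass: count lines from the end; the last update (earliest line)
--     # records the length of the suffix beginning at the first body-start line.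
--     lines = text.splitlines()
--     seen = 0
--     keep = 0
--     for line in reversed(lines):
--         seen += 1
--         if _is_body_start(line.strip()):
--             keep = seen
--     if keep == 0:
--         return ""
--     return "\n".join(lines[len(lines) - keep:]).strip()
-- ===== Notes on version B (the rewrite author's own statement) =====
-- stated objective: alternative
-- what changed: Replaces A's forward accumulate-while-flag pass with a backward traversal over reversed(lines) that computes the length of the suffix starting at the first body-start line (the last update in the reverse scan), then slices and joins once; the flag and per-line appends disappear.
import Mathlib
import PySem

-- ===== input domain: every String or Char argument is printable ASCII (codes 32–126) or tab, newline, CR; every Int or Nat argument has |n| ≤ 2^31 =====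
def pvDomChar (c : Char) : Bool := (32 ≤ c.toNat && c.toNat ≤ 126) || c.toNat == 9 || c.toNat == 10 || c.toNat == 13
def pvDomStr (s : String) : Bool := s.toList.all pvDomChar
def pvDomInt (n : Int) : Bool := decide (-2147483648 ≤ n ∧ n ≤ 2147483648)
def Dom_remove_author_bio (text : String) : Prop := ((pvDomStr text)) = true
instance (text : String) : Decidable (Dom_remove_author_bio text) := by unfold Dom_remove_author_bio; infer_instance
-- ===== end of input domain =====

-- B replaces A's forward accumulate-while-flag pass with a BACKWARD pass that computes the
-- length of the suffix starting at the first body-start line, then slices once (objective: alternative).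

-- ===== PORT A =====
-- hand port of `s[:1].isupper()` (str.isupper on a string of length ≤ 1): exact — Python's
-- ''.isupper() is False and a one-char string is upper iff the char is an uppercase letter.
def pvHead1Upper (s : List Char) : Bool :=
  match PySem.Chars.slice s none (some 1) with
  | [] => false
  | c :: _ => PySem.Chars.isupper c

-- A's loop body: compute stripped, update the skip flag, append when not skipping.
def pvStepA (st : List (List Char) × Bool) (line : List Char) : List (List Char) × Bool :=
  let stripped := PySem.Chars.strip line
  let skip : Bool :=
    if (PySem.Chars.startswith stripped "CHARLESTON".toList
        || PySem.Chars.startswith stripped "NORTH CHARLESTON".toList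
        || PySem.Chars.startswith stripped "COLUMBIA".toList
        || PySem.Chars.startswith stripped "GREENVILLE".toList
        || PySem.Chars.startswith stripped "SPARTANBURG".toList
        || PySem.Chars.startswith stripped "—".toList
        || (pvHead1Upper stripped && PySem.Chars.isIn " — ".toList stripped)
        || PySem.Chars.startswith stripped "It was".toList
        || PySem.Chars.startswith stripped "On ".toList)
    then false else st.2
  if !skip then (st.1 ++ [line], skip) else (st.1, skip)

def remove_author_bio (text : String) : String :=
  let lines := PySem.Chars.splitlines text.toList
  let res := lines.foldl pvStepA ([], true)
  String.ofList (PySem.Chars.strip (PySem.Chars.join ['\n'] res.1))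

-- ===== PORT B =====
-- B's factored body-start predicate on the stripped line.
def pvIsBodyStart (stripped : List Char) : Bool :=
  PySem.Chars.startswith stripped "CHARLESTON".toList
  || PySem.Chars.startswith stripped "NORTH CHARLESTON".toList
  || PySem.Chars.startswith stripped "COLUMBIA".toList
  || PySem.Chars.startswith stripped "GREENVILLE".toList
  || PySem.Chars.startswith stripped "SPARTANBURG".toList
  || PySem.Chars.startswith stripped "—".toList
  || (pvHead1Upper stripped && PySem.Chars.isIn " — ".toList stripped)
  || PySem.Chars.startswith stripped "It was".toList
  || PySem.Chars.startswith stripped "On ".toList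

-- B's backward loop body on state (seen, keep): count this line; if it is a body start,
-- the suffix beginning here has length seen+1.
def pvStepB (st : Nat × Nat) (line : List Char) : Nat × Nat :=
  let seen := st.1 + 1
  (seen, if pvIsBodyStart (PySem.Chars.strip line) then seen else st.2)

def remove_author_bio_alt (text : String) : String :=
  let lines := PySem.Chars.splitlines text.toList
  let res := lines.reverse.foldl pvStepB (0, 0)
  if res.2 = 0 then ""
  else String.ofList (PySem.Chars.strip (PySem.Chars.join ['\n'] (lines.drop (lines.length - res.2))))

-- ===== PRECONDITION & SPEC =====
def Spec_remove_author_bio (text : String) (out : String) : Prop := out = remove_author_bio_alt text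
instance (text : String) (out : String) : Decidable (Spec_remove_author_bio text out) := by unfold Spec_remove_author_bio; infer_instance

-- ===== CLAIM (what is proved, stated in full; the proofs are below) =====
def Claim_equal_remove_author_bio : Prop := ∀ (text : String), Dom_remove_author_bio text → Spec_remove_author_bio text (remove_author_bio text)

-- ===== LEMMAS AND PROOFS =====

-- pvStepA's inline condition is definitionally B's predicate on the stripped line.
lemma pvStepA_eq (st : List (List Char) × Bool) (line : List Char) :
    pvStepA st line =
      (let skip : Bool := if pvIsBodyStart (PySem.Chars.strip line) then false else st.2
       if !skip then (st.1 ++ [line], skip) else (st.1, skip)) := rfl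

-- Once the skip flag is cleared, A's loop appends every remaining line unchanged.
lemma pv_foldl_false (lines : List (List Char)) (acc : List (List Char)) :
    lines.foldl pvStepA (acc, false) = (acc ++ lines, false) := by
  induction lines generalizing acc with
  | nil => simp
  | cons l t ih => simp [pvStepA_eq, ih]

-- A's loop starting with skip = true collects exactly the suffix from the first body-start line.
lemma pv_foldl_true (lines : List (List Char)) (acc : List (List Char)) :
    (lines.foldl pvStepA (acc, true)).1 =
      match lines.findIdx? (fun line => pvIsBodyStart (PySem.Chars.strip line)) with
      | none => acc
      | some idx => acc ++ lines.drop idx := by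
  induction lines generalizing acc with
  | nil => simp
  | cons l t ih =>
    by_cases h : pvIsBodyStart (PySem.Chars.strip l) = true
    · have hstep : pvStepA (acc, true) l = (acc ++ [l], false) := by
        rw [pvStepA_eq]; simp [h]
      simp [List.foldl_cons, hstep, pv_foldl_false, List.findIdx?_cons, h]
    · have hstep : pvStepA (acc, true) l = (acc, true) := by
        rw [pvStepA_eq]; simp [h]
      rw [List.foldl_cons, hstep, ih]
      rw [List.findIdx?_cons]
      simp only [h, if_false, Bool.false_eq_true]
      cases t.findIdx? (fun line => pvIsBodyStart (PySem.Chars.strip line)) with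
      | none => simp
      | some i => simp

-- findIdx? returns an in-range index (proved here; used by both proofs below).
lemma pv_findIdx?_lt {α : Type} (p : α → Bool) :
    ∀ (l : List α) (i : Nat), l.findIdx? p = some i → i < l.length := by
  intro l
  induction l with
  | nil => intro i h; simp at h
  | cons a t ih =>
    intro i h
    rw [List.findIdx?_cons] at h
    by_cases hp : p a = true
    · simp [hp] at h
      simp only [List.length_cons]
      omega
    · simp [hp] at h
      obtain ⟨j, hj, rfl⟩ := h
      have := ih j hj
      simp only [List.length_cons]
      omega

-- B's backward pass: the first component counts the lines, the second is length - (first match index).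
lemma pv_foldl_back (lines : List (List Char)) :
    lines.reverse.foldl pvStepB (0, 0) =
      (lines.length,
       match lines.findIdx? (fun line => pvIsBodyStart (PySem.Chars.strip line)) with
       | none => 0
       | some idx => lines.length - idx) := by
  rw [List.foldl_reverse]
  induction lines with
  | nil => simp
  | cons l t ih =>
    rw [List.foldr_cons, ih, List.findIdx?_cons]
    by_cases h : pvIsBodyStart (PySem.Chars.strip l) = true
    · simp [pvStepB, h]
    · simp only [h, if_false, Bool.false_eq_true]
      cases hf : t.findIdx? (fun line => pvIsBodyStart (PySem.Chars.strip line)) with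
      | none => simp [pvStepB, h]
      | some i =>
        have hi : i < t.length := pv_findIdx?_lt _ _ _ hf
        simp [pvStepB, h]

-- ===== VERDICT (by name: the statement is the Claim_ definition above) =====
theorem remove_author_bio_spec : Claim_equal_remove_author_bio := by
  intro text _
  unfold Spec_remove_author_bio remove_author_bio remove_author_bio_alt
  have hA := pv_foldl_true (PySem.Chars.splitlines text.toList) []
  have hB := pv_foldl_back (PySem.Chars.splitlines text.toList)
  cases hf : (PySem.Chars.splitlines text.toList).findIdx?
      (fun line => pvIsBodyStart (PySem.Chars.strip line)) with
  | none =>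
    rw [hf] at hA hB
    simp only [hB, hA]
    rfl
  | some i =>
    rw [hf] at hA hB
    have hi : i < (PySem.Chars.splitlines text.toList).length :=
      pv_findIdx?_lt _ _ _ hf
    simp only [hB, hA]
    have hne : (PySem.Chars.splitlines text.toList).length - i ≠ 0 := by omega
    simp only [hne, if_false]
    have : (PySem.Chars.splitlines text.toList).length -
        ((PySem.Chars.splitlines text.toList).length - i) = i := by omega
    rw [this]
    simp
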